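-- pv_equiv track=rewrite | github.com/sallowdish/ProjectEuler | 6. Sum Square Difference/Sum Square Difference.py | sumSquareDiff
-- ===== SOURCE A (Python) =====
-- def sumSquareDiff(n):
--     sum = 0
--     lst = [i for i in range(1, n+1)]
--     for i in lst:
--         for j in lst:
--             if i != j:
--                 sum += i*j
--     return sum
-- ===== SOURCE B (Python) =====
-- def sumSquareDiff(n):
--     # Closed form: sum over ordered pairs i != j of i*j = (sum 1..n)^2 - sum of squares 1..n
--     if n < 1:
--         return 0
--     s1 = n * (n + 1) // 2
--     s2 = n * (n + 1) * (2 * n + 1) // 6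
--     return s1 * s1 - s2
-- ===== Notes on version B (the rewrite author's own statement) =====
-- stated objective: faster
-- what changed: Replaces the quadratic double loop over range(1,n+1) with the closed-form (n(n+1)/2)^2 - n(n+1)(2n+1)/6.
import Mathlib
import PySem

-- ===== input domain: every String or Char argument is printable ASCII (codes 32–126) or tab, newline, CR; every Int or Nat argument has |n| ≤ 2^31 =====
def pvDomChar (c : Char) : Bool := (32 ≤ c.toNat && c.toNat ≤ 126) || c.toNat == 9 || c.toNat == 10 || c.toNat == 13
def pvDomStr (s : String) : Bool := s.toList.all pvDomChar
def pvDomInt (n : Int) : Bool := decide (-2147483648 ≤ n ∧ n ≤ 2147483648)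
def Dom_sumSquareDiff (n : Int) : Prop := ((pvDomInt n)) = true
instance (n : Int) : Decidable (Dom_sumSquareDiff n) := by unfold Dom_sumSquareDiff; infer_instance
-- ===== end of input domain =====

-- B replaces A's quadratic double loop with the O(1) closed form (n(n+1)/2)^2 - n(n+1)(2n+1)/6.

-- ===== PORT A =====
def sumSquareDiff (n : Int) : Int :=
  let lst := PySem.List.pyRange 1 (n + 1) 1
  lst.foldl (fun s i => lst.foldl (fun s j => if i ≠ j then s + i * j else s) s) 0

-- ===== PORT B =====
def sumSquareDiff_alt (n : Int) : Int :=
  if n < 1 then 0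
  else
    let s1 := PySem.Int.floordiv (n * (n + 1)) 2
    let s2 := PySem.Int.floordiv (n * (n + 1) * (2 * n + 1)) 6
    s1 * s1 - s2

-- ===== PRECONDITION & SPEC =====
def Spec_sumSquareDiff (n : Int) (out : Int) : Prop := out = sumSquareDiff_alt n
instance (n : Int) (out : Int) : Decidable (Spec_sumSquareDiff n out) := by unfold Spec_sumSquareDiff; infer_instance

-- ===== CLAIM (what is proved, stated in full; the proofs are below) =====
def Claim_equal_sumSquareDiff : Prop := ∀ (n : Int), Dom_sumSquareDiff n → Spec_sumSquareDiff n (sumSquareDiff n)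

-- ===== LEMMAS AND PROOFS =====

-- inner loop when i does not occur in l
lemma inner_notmem (i : Int) (l : List Int) (s : Int) (h : i ∉ l) :
    l.foldl (fun s j => if i ≠ j then s + i * j else s) s = s + i * l.sum := by
  induction l generalizing s with
  | nil => simp
  | cons a l ih =>
    have hne : i ≠ a := fun e => h (e ▸ List.mem_cons_self)
    have h' : i ∉ l := fun hm => h (List.mem_cons_of_mem _ hm)
    simp only [List.foldl_cons, if_pos hne, List.sum_cons, ih _ h']
    ring

-- inner loop when i occurs exactly once in l
lemma inner_mem (i : Int) (l : List Int) (s : Int) (hnd : l.Nodup) (h : i ∈ l) :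
    l.foldl (fun s j => if i ≠ j then s + i * j else s) s = s + i * (l.sum - i) := by
  induction l generalizing s with
  | nil => cases h
  | cons a l ih =>
    rcases List.mem_cons.mp h with rfl | hm
    · have hni : i ∉ l := (List.nodup_cons.mp hnd).1
      simp only [List.foldl_cons]
      rw [if_neg (by simp), inner_notmem i l s hni, List.sum_cons]
      ring
    · have hne : i ≠ a := fun e => (List.nodup_cons.mp hnd).1 (e ▸ hm)
      simp only [List.foldl_cons, if_pos hne, List.sum_cons,
        ih _ (List.nodup_cons.mp hnd).2 hm]
      ring

-- sum of i*(c-i) over a list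
lemma sum_mul_sub (c : Int) (l : List Int) :
    (l.map (fun i => i * (c - i))).sum = c * l.sum - (l.map (fun i => i * i)).sum := by
  induction l with
  | nil => simp
  | cons a l ih => simp [ih]; ring

-- 2 * (1 + 2 + … + m) = m(m+1)
lemma sum_pyRange (m : Nat) :
    (PySem.List.pyRange 1 ((m : Int) + 1) 1).sum * 2 = (m : Int) * (m + 1) := by
  induction m with
  | zero => simp [PySem.List.pyRange_one_eq_nil]
  | succ k ih =>
    have h : (1 : Int) ≤ (k : Int) + 1 := by omega
    have : ((k : Int) + 1 + 1) = ((k : Int) + 1) + 1 := by ring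
    rw [show ((k + 1 : Nat) : Int) = (k : Int) + 1 by push_cast; ring,
      PySem.List.pyRange_one_succ_right h]
    simp only [List.sum_append, List.sum_cons, List.sum_nil]
    nlinarith [ih]

-- 6 * (1² + 2² + … + m²) = m(m+1)(2m+1)
lemma sumsq_pyRange (m : Nat) :
    ((PySem.List.pyRange 1 ((m : Int) + 1) 1).map (fun i => i * i)).sum * 6
      = (m : Int) * (m + 1) * (2 * m + 1) := by
  induction m with
  | zero => simp [PySem.List.pyRange_one_eq_nil]
  | succ k ih =>
    have h : (1 : Int) ≤ (k : Int) + 1 := by omega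
    rw [show ((k + 1 : Nat) : Int) = (k : Int) + 1 by push_cast; ring,
      PySem.List.pyRange_one_succ_right h]
    simp only [List.map_append, List.map_cons, List.map_nil, List.sum_append,
      List.sum_cons, List.sum_nil]
    nlinarith [ih]

-- A's double loop equals T² - Q where T, Q are the sum and square-sum of the range
lemma sumSquareDiff_eq (n : Int) :
    sumSquareDiff n =
      (PySem.List.pyRange 1 (n + 1) 1).sum * (PySem.List.pyRange 1 (n + 1) 1).sum
        - ((PySem.List.pyRange 1 (n + 1) 1).map (fun i => i * i)).sum := by
  unfold sumSquareDiff
  set L := PySem.List.pyRange 1 (n + 1) 1 with hL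
  have hnd : L.Nodup := PySem.List.nodup_pyRange_one 1 (n + 1)
  rw [PySem.List.foldl_congr_mem L _ (fun s i => s + i * (L.sum - i)) 0
    (fun s i hi => inner_mem i L s hnd hi)]
  rw [PySem.List.foldl_add L (fun i => i * (L.sum - i)) 0,
    sum_mul_sub L.sum L]
  ring

-- ===== VERDICT (by name: the statement is the Claim_ definition above) =====
theorem sumSquareDiff_spec : Claim_equal_sumSquareDiff := by
  intro n _
  unfold Spec_sumSquareDiff sumSquareDiff_alt
  rw [sumSquareDiff_eq]
  by_cases hn : n < 1
  · rw [if_pos hn, PySem.List.pyRange_one_eq_nil (by omega)]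
    simp
  · rw [if_neg hn]
    obtain ⟨m, hm⟩ : ∃ m : Nat, n = (m : Int) := ⟨n.toNat, by omega⟩
    subst hm
    have hT := sum_pyRange m
    have hQ := sumsq_pyRange m
    have h1 : PySem.Int.floordiv ((m : Int) * (m + 1)) 2
        = (PySem.List.pyRange 1 ((m : Int) + 1) 1).sum := by
      rw [PySem.Int.floordiv_eq_iff_of_pos (by omega)]
      omega
    have h2 : PySem.Int.floordiv ((m : Int) * (m + 1) * (2 * m + 1)) 6
        = ((PySem.List.pyRange 1 ((m : Int) + 1) 1).map (fun i => i * i)).sum := by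
      rw [PySem.Int.floordiv_eq_iff_of_pos (by omega)]
      constructor <;> nlinarith [hQ]
    simp only [h1, h2]
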